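-- pv_equiv track=rewrite | github.com/NExTplusplus/4EBaseMetal | code/new_Analyst_Report_Chinese/step4_sentiment_analysis/model_function.py | calculate_the_bin
-- ===== SOURCE A (Python) =====
-- def calculate_the_bin(x, quantile):
--     '''
--     :param x:int/float, data is in need of dividing.
--     :param quantile:list, the quantile point
--
--     :return bin:,int, the certain group of x
--     '''
--     assert type(x) != str, 'x is str'
--     assert str not in [type(i) for i in quantile], "quantile contains str"
--
--     bin = len(quantile)
--     for i in range(len(quantile)):
--         if x < quantile[i]:
--             bin = i
--             break
--     return bin
-- ===== SOURCE B (Python) =====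
-- def calculate_the_bin(x, quantile):
--     # divide and conquer on halves: the bin lies in the left half iff a
--     # qualifying threshold occurs there; otherwise it is the left length
--     # plus the right half's answer. Correct without any sortedness
--     # assumption because the first qualifying index of l+r is the first
--     # qualifying index of l if one exists, else len(l) + that of r.
--     n = len(quantile)
--     if n == 0:
--         return 0
--     if n == 1:
--         return 0 if x < quantile[0] else 1
--     m = n // 2
--     left = calculate_the_bin(x, quantile[:m])
--     if left < m:
--         return left
--     return m + calculate_the_bin(x, quantile[m:])
-- ===== Notes on version B (the rewrite author's own statement) =====
-- stated objective: alternative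
-- what changed: replaces A's single forward scan with early break by a divide-and-conquer recursion on list halves: solve the left half, keep its answer if it found a qualifying threshold, otherwise offset the right half's answer
import Mathlib
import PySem

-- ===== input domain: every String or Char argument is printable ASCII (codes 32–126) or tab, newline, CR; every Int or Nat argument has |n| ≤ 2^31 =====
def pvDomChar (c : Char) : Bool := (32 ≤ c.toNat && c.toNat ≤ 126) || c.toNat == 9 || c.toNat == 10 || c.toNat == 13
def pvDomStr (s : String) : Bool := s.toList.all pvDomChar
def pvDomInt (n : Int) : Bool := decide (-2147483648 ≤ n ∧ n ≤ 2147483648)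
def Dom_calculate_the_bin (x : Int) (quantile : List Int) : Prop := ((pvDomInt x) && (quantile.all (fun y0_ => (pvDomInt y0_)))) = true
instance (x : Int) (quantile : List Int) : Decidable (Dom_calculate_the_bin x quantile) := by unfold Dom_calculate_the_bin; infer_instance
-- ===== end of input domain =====

-- B replaces A's linear scan with early break by a divide-and-conquer recursion on list halves (alternative decomposition, same result on every input).
-- ===== PORT A =====
-- A's `for i in range(len(quantile)): if x < quantile[i]: bin = i; break` as structural
-- recursion carrying the current index; falling off the list returns len(quantile).
def calculate_the_bin_loop (x : Int) (i : Int) : List Int → Int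
  | [] => i
  | q :: rest => if x < q then i else calculate_the_bin_loop x (i + 1) rest

def calculate_the_bin (x : Int) (quantile : List Int) : Int :=
  calculate_the_bin_loop x 0 quantile

-- ===== PORT B =====
-- B's recursion on halves: quantile[:m] / quantile[m:] are List.take / List.drop at m = n // 2.
def calculate_the_bin_alt (x : Int) (quantile : List Int) : Int :=
  if quantile.length = 0 then 0
  else if quantile.length = 1 then
    (if x < quantile.headI then 0 else 1)
  else
    let m := quantile.length / 2
    let left := calculate_the_bin_alt x (quantile.take m)
    if left < (m : Int) then left
    else (m : Int) + calculate_the_bin_alt x (quantile.drop m)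
termination_by quantile.length
decreasing_by
  · rename_i h0 h1
    exact Nat.lt_of_le_of_lt (List.length_take_le _ _)
      (Nat.div_lt_self (Nat.pos_of_ne_zero h0) one_lt_two)
  · rw [List.length_drop]
    omega

-- ===== PRECONDITION & SPEC =====
def Spec_calculate_the_bin (x : Int) (quantile : List Int) (out : Int) : Prop := out = calculate_the_bin_alt x quantile
instance (x : Int) (quantile : List Int) (out : Int) : Decidable (Spec_calculate_the_bin x quantile out) := by unfold Spec_calculate_the_bin; infer_instance

-- ===== CLAIM (what is proved, stated in full; the proofs are below) =====
def Claim_equal_calculate_the_bin : Prop := ∀ (x : Int) (quantile : List Int), Dom_calculate_the_bin x quantile → Spec_calculate_the_bin x quantile (calculate_the_bin x quantile)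

-- ===== LEMMAS AND PROOFS =====

-- the loop translates the start index
theorem loop_shift (x : Int) (q : List Int) : ∀ (s : Int),
    calculate_the_bin_loop x s q = s + calculate_the_bin_loop x 0 q := by
  induction q with
  | nil => intro s; simp [calculate_the_bin_loop]
  | cons a t ih =>
    intro s
    simp only [calculate_the_bin_loop]
    by_cases h : x < a
    · simp [h]
    · simp only [h, if_false]
      rw [ih (s + 1), ih (0 + 1)]
      ring

theorem loop_cons (x a : Int) (t : List Int) :
    calculate_the_bin_loop x 0 (a :: t)
      = if x < a then 0 else 1 + calculate_the_bin_loop x 0 t := by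
  simp only [calculate_the_bin_loop]
  by_cases h : x < a
  · simp [h]
  · simp only [h, if_false]
    rw [loop_shift x t (0 + 1)]
    ring

theorem loop_bounds (x : Int) (q : List Int) :
    0 ≤ calculate_the_bin_loop x 0 q ∧ calculate_the_bin_loop x 0 q ≤ (q.length : Int) := by
  induction q with
  | nil => simp [calculate_the_bin_loop]
  | cons a t ih =>
    rw [loop_cons]
    simp only [List.length_cons]
    push_cast
    split_ifs <;> omega

-- splitting the list: the answer on l ++ r is l's if it found something, else |l| + r's
theorem loop_append (x : Int) (l r : List Int) :
    calculate_the_bin_loop x 0 (l ++ r)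
      = if calculate_the_bin_loop x 0 l < (l.length : Int)
        then calculate_the_bin_loop x 0 l
        else (l.length : Int) + calculate_the_bin_loop x 0 r := by
  induction l with
  | nil => simp [calculate_the_bin_loop]
  | cons a t ih =>
    rw [List.cons_append, loop_cons, loop_cons, ih]
    have hb := loop_bounds x t
    have hr := loop_bounds x r
    simp only [List.length_cons]
    push_cast
    split_ifs <;> omega

theorem alt_eq_loop (x : Int) : ∀ (n : Nat) (q : List Int), q.length ≤ n →
    calculate_the_bin_alt x q = calculate_the_bin_loop x 0 q := by
  intro n
  induction n with
  | zero =>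
    intro q hq
    have hq0 : q = [] := List.length_eq_zero_iff.mp (Nat.le_zero.mp hq)
    subst hq0
    rw [calculate_the_bin_alt.eq_def]
    simp [calculate_the_bin_loop]
  | succ n ih =>
    intro q hq
    rw [calculate_the_bin_alt.eq_def]
    by_cases h0 : q.length = 0
    · rw [List.length_eq_zero_iff.mp h0]
      simp [calculate_the_bin_loop]
    · by_cases h1 : q.length = 1
      · obtain ⟨a, ha⟩ := List.length_eq_one_iff.mp h1
        subst ha
        rw [loop_cons]
        simp [calculate_the_bin_loop]
      · have hm1 : 1 ≤ q.length / 2 := by omega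
        have hm2 : q.length / 2 < q.length := by omega
        have hlt : (q.take (q.length / 2)).length ≤ n := by
          simp only [List.length_take]; omega
        have hdt : (q.drop (q.length / 2)).length ≤ n := by
          simp only [List.length_drop]; omega
        simp only [h0, h1, if_false]
        rw [ih _ hlt, ih _ hdt]
        conv_rhs => rw [(List.take_append_drop (q.length / 2) q).symm]
        rw [loop_append]
        have hlen : ((q.take (q.length / 2)).length : Int) = ((q.length / 2 : Nat) : Int) := by
          simp only [List.length_take]; congr 1; omega
        rw [hlen]

-- ===== VERDICT (by name: the statement is the Claim_ definition above) =====
theorem calculate_the_bin_spec : Claim_equal_calculate_the_bin := by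
  intro x quantile _
  unfold Spec_calculate_the_bin calculate_the_bin
  exact (alt_eq_loop x quantile.length quantile le_rfl).symm
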